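-- pv_equiv track=rewrite | github.com/kaikelopes301-code/analytiq-ai | ai_agent.py | _sort_models
-- ===== SOURCE A (Python) =====
-- PREFERRED_MODELS = (
--     "gemini-3-flash-preview",
--     "gemini-3.1-flash-lite-preview",
--     "gemini-2.5-flash",
--     "gemini-2.0-flash",
--     "gemini-2.0-flash-lite",
-- )
--
-- def _normalize_model_name(model_name: str | None) -> str:
--     """Normalize API model names such as models/gemini-2.5-flash."""
--     if not model_name:
--         return ""
--     normalized = model_name.strip()
--     return normalized[7:] if normalized.startswith("models/") else normalized
--
-- def _sort_models(models: list[str]) -> list[str]: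
--     """Sort known models with preferred Gemini Flash variants first."""
--     unique_models = list(dict.fromkeys(_normalize_model_name(model) for model in models if model))
--
--     def rank(name: str):
--         if name in PREFERRED_MODELS:
--             return (0, PREFERRED_MODELS.index(name), name)
--         if name.startswith("gemini-"):
--             return (1, 0, name)
--         if name.startswith("gemma-"):
--             return (2, 0, name)
--         return (3, 0, name)
--
--     return sorted(unique_models, key=rank)
-- ===== SOURCE B (Python) =====
-- PREFERRED_MODELS = (
--     "gemini-3-flash-preview",
--     "gemini-3.1-flash-lite-preview",
--     "gemini-2.5-flash",
--     "gemini-2.0-flash",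
--     "gemini-2.0-flash-lite",
-- )
--
-- def _normalize_model_name(model_name):
--     """Normalize API model names such as models/gemini-2.5-flash."""
--     if not model_name:
--         return ""
--     normalized = model_name.strip()
--     return normalized[7:] if normalized.startswith("models/") else normalized
--
-- def _sort_models(models):
--     """Bucket decomposition: preferred segment in canonical order, then three sorted buckets."""
--     seen = dict.fromkeys(_normalize_model_name(m) for m in models if m)
--     preferred = [p for p in PREFERRED_MODELS if p in seen]
--     rest = [n for n in seen if n not in PREFERRED_MODELS]
--     gemini = sorted(n for n in rest if n.startswith("gemini-"))
--     gemma = sorted(n for n in rest if n.startswith("gemma-"))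
--     other = sorted(n for n in rest
--                    if not n.startswith("gemini-") and not n.startswith("gemma-"))
--     return preferred + gemini + gemma + other
-- ===== Notes on version B (the rewrite author's own statement) =====
-- stated objective: simpler
-- what changed: Replaces the single comparison sort over a (bucket, preference-index, name) rank tuple by a bucket decomposition: the preferred segment is read off PREFERRED_MODELS in canonical order (no .index calls) and the remaining names are split into three plainly name-sorted buckets that are concatenated.
import Mathlib
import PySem

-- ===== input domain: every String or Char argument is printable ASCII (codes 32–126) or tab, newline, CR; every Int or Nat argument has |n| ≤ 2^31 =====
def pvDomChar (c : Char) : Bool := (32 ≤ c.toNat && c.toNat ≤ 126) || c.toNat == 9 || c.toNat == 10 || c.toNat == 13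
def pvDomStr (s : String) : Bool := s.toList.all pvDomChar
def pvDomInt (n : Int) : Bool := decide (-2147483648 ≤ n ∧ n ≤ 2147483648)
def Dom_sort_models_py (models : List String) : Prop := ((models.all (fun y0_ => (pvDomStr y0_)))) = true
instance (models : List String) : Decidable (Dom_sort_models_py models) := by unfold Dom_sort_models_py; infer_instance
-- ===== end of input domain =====

-- B replaces A's one comparison sort over a (bucket, preference-index, name) rank tuple by a bucket
-- decomposition: preferred names read off PREFERRED_MODELS in canonical order, then three name-sorted
-- buckets, concatenated (objective: simpler).

-- ===== PORT A =====
def PREFERRED_MODELS : List String :=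
  ["gemini-3-flash-preview", "gemini-3.1-flash-lite-preview", "gemini-2.5-flash",
   "gemini-2.0-flash", "gemini-2.0-flash-lite"]

def normalize_model_name (model_name : String) : String :=
  if model_name = "" then ""
  else
    let normalized := PySem.Str.strip model_name
    if PySem.Str.startswith normalized "models/" then PySem.Str.slice normalized (some 7) none
    else normalized

-- Python compares str values by code point (PySem: str '<' = '<' on the code-point list);
-- as the components of a sort key we represent a string by that code list.
def strCodes (n : String) : List Int := n.toList.map (fun c => (c.toNat : Int))

-- Python's rank key is the tuple (int, int, str), compared lexicographically; that comparison
-- is EXACTLY lexicographic '<' on the flattened list [bucket, index] ++ codes(name) (the first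
-- two entries always both present, then the string code points, a prefix being smaller) — the
-- tuple is ported as that list.  PREFERRED_MODELS.index(name) is evaluated only under
-- 'name ∈ PREFERRED_MODELS', where index? is some; getD 0.
def rank (name : String) : List Int :=
  if name ∈ PREFERRED_MODELS then
    0 :: (((PySem.List.index? PREFERRED_MODELS name).getD 0 : Nat) : Int) :: strCodes name
  else if PySem.Str.startswith name "gemini-" then 1 :: 0 :: strCodes name
  else if PySem.Str.startswith name "gemma-" then 2 :: 0 :: strCodes name
  else 3 :: 0 :: strCodes name

def sort_models_py (models : List String) : List String :=
  let unique_models :=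
    PySem.List.dedup ((models.filter (fun m => m != "")).map normalize_model_name)
  PySem.List.sorted unique_models rank

-- ===== PORT B =====
-- Python's plain sorted(names) compares strings by code point: key = the code list strCodes.
def sort_models_py_alt (models : List String) : List String :=
  let seen := PySem.List.dedup ((models.filter (fun m => m != "")).map normalize_model_name)
  let preferred := PREFERRED_MODELS.filter (fun p => decide (p ∈ seen))
  let rest := seen.filter (fun n => decide (n ∉ PREFERRED_MODELS))
  let gemini := PySem.List.sorted (rest.filter (fun n => PySem.Str.startswith n "gemini-")) strCodes
  let gemma := PySem.List.sorted (rest.filter (fun n => PySem.Str.startswith n "gemma-")) strCodes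
  let other := PySem.List.sorted
    (rest.filter (fun n => !PySem.Str.startswith n "gemini-" && !PySem.Str.startswith n "gemma-"))
    strCodes
  preferred ++ gemini ++ gemma ++ other

-- ===== PRECONDITION & SPEC =====
def Spec_sort_models_py (models : List String) (out : List String) : Prop := out = sort_models_py_alt models
instance (models : List String) (out : List String) : Decidable (Spec_sort_models_py models out) := by unfold Spec_sort_models_py; infer_instance

-- ===== CLAIM (what is proved, stated in full; the proofs are below) =====
def Claim_equal_sort_models_py : Prop := ∀ (models : List String), Dom_sort_models_py models → Spec_sort_models_py models (sort_models_py models)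

-- ===== LEMMAS AND PROOFS =====

theorem cons_lt_of_head {i j : Int} {s t : List Int} (h : i < j) : i :: s < j :: t :=
  (List.lt_iff_lex_lt _ _).mpr (List.Lex.rel h)

theorem cons_lt_of_tail {i : Int} {s t : List Int} (h : s < t) : i :: s < i :: t :=
  (List.lt_iff_lex_lt _ _).mpr (List.Lex.cons ((List.lt_iff_lex_lt _ _).mp h))

theorem strCodes_inj {a b : String} (h : strCodes a = strCodes b) : a = b := by
  unfold strCodes at h
  have hinj : Function.Injective (fun c : Char => (c.toNat : Int)) := by
    intro c d hcd
    simp only at hcd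
    have : c.toNat = d.toNat := by exact_mod_cast hcd
    exact (StrictMono.injective (f := Char.toNat) fun _ _ hlt => hlt) this
  exact String.toList_inj.mp (List.map_injective_iff.mpr hinj h)

theorem rank_of_mem {n : String} (h : n ∈ PREFERRED_MODELS) :
    rank n = 0 :: (((PySem.List.index? PREFERRED_MODELS n).getD 0 : Nat) : Int) :: strCodes n := by
  simp [rank, h]

theorem rank_gemini {n : String} (h : n ∉ PREFERRED_MODELS)
    (hg : PySem.Str.startswith n "gemini-" = true) :
    rank n = 1 :: 0 :: strCodes n := by
  rw [PySem.Str.startswith_eq] at hg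
  have hg' : PySem.Chars.startswith n.toList ['g', 'e', 'm', 'i', 'n', 'i', '-'] = true := hg
  simp [rank, h, hg']

theorem rank_gemma {n : String} (h : n ∉ PREFERRED_MODELS)
    (hg : PySem.Str.startswith n "gemini-" = false)
    (hm : PySem.Str.startswith n "gemma-" = true) :
    rank n = 2 :: 0 :: strCodes n := by
  rw [PySem.Str.startswith_eq] at hg hm
  have hg' : PySem.Chars.startswith n.toList ['g', 'e', 'm', 'i', 'n', 'i', '-'] = false := hg
  have hm' : PySem.Chars.startswith n.toList ['g', 'e', 'm', 'm', 'a', '-'] = true := hm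
  simp [rank, h, hg', hm']

theorem rank_other {n : String} (h : n ∉ PREFERRED_MODELS)
    (hg : PySem.Str.startswith n "gemini-" = false)
    (hm : PySem.Str.startswith n "gemma-" = false) :
    rank n = 3 :: 0 :: strCodes n := by
  rw [PySem.Str.startswith_eq] at hg hm
  have hg' : PySem.Chars.startswith n.toList ['g', 'e', 'm', 'i', 'n', 'i', '-'] = false := hg
  have hm' : PySem.Chars.startswith n.toList ['g', 'e', 'm', 'm', 'a', '-'] = false := hm
  simp [rank, h, hg', hm']

-- gemma- and gemini- prefixes are disjoint
theorem not_gemini_of_gemma {n : String} (hm : PySem.Str.startswith n "gemma-" = true) :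
    PySem.Str.startswith n "gemini-" = false := by
  by_contra hg
  rw [Bool.not_eq_false] at hg
  rw [PySem.Str.startswith_eq, PySem.Chars.startswith_iff] at hm hg
  rcases List.prefix_or_prefix_of_prefix hm hg with h | h
  · exact absurd h (by decide)
  · exact absurd h.length_le (by decide)

theorem pm_idx_pairwise :
    PREFERRED_MODELS.Pairwise
      (fun a b => ((PySem.List.index? PREFERRED_MODELS a).getD 0 : Nat)
                < ((PySem.List.index? PREFERRED_MODELS b).getD 0 : Nat)) := by
  decide

theorem pm_rank_pairwise :
    PREFERRED_MODELS.Pairwise (fun a b => rank a < rank b) := by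
  refine pm_idx_pairwise.imp_of_mem ?_
  intro a b ha hb h
  rw [rank_of_mem ha, rank_of_mem hb]
  exact cons_lt_of_tail (cons_lt_of_head (by exact_mod_cast h))

-- the port elaborates sorted's DecidableLT on List Int from core's List.decidableLT; the PySem
-- order lemmas state it with the (propositionally equal) LinearOrder instance — a bridge:
theorem sorted_inst_eq {α : Type} (xs : List α) (key : α → List Int) :
    @PySem.List.sorted α (List Int) List.instLT (fun a b => List.decidableLT a b) xs key false
    = @PySem.List.sorted α (List Int) Preorder.toLT LinearOrder.toDecidableLT xs key false := by
  have hD : (fun (a b : List Int) => List.decidableLT a b)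
      = (@LinearOrder.toDecidableLT (List Int) _) := by
    funext a b; exact Subsingleton.elim _ _
  exact congrArg (fun d => @PySem.List.sorted α (List Int) List.instLT d xs key false) hD

theorem sorted_codes_pairwise_lt {xs : List String} (h : xs.Nodup) :
    (PySem.List.sorted xs strCodes).Pairwise (fun a b => strCodes a < strCodes b) := by
  rw [sorted_inst_eq]
  have hle := PySem.List.sorted_pairwise xs strCodes
  have hnd : (@PySem.List.sorted String (List Int) Preorder.toLT LinearOrder.toDecidableLT xs
      strCodes false).Nodup := by
    rw [← sorted_inst_eq]
    exact (PySem.List.sorted_perm xs strCodes false).symm.nodup h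
  have hnd' : (@PySem.List.sorted String (List Int) Preorder.toLT LinearOrder.toDecidableLT xs
      strCodes false).Pairwise (fun a b => a ≠ b) := hnd
  exact (hle.and hnd').imp
    (fun hab => lt_of_le_of_ne hab.1 (fun he => hab.2 (strCodes_inj he)))

-- the heart of the proof: for any Nodup list u, A's rank-sort equals B's bucket concatenation
theorem buckets_core (u : List String) (hu : u.Nodup) :
    PySem.List.sorted u rank =
      PREFERRED_MODELS.filter (fun p => decide (p ∈ u)) ++
      PySem.List.sorted ((u.filter (fun n => decide (n ∉ PREFERRED_MODELS))).filter
        (fun n => PySem.Str.startswith n "gemini-")) strCodes ++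
      PySem.List.sorted ((u.filter (fun n => decide (n ∉ PREFERRED_MODELS))).filter
        (fun n => PySem.Str.startswith n "gemma-")) strCodes ++
      PySem.List.sorted ((u.filter (fun n => decide (n ∉ PREFERRED_MODELS))).filter
        (fun n => !PySem.Str.startswith n "gemini-" && !PySem.Str.startswith n "gemma-"))
        strCodes := by
  have hPMnd : PREFERRED_MODELS.Nodup := by decide
  set pg : String → Bool := fun n => PySem.Str.startswith n "gemini-" with hpgdef
  set pm : String → Bool := fun n => PySem.Str.startswith n "gemma-" with hpmdef
  set po : String → Bool := fun n => !PySem.Str.startswith n "gemini-" && !PySem.Str.startswith n "gemma-" with hpodef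
  set rest : List String := u.filter (fun n => decide (n ∉ PREFERRED_MODELS)) with hrestdef
  set G : List String := PySem.List.sorted (rest.filter pg) strCodes with hGdef
  set M : List String := PySem.List.sorted (rest.filter pm) strCodes with hMdef
  set O : List String := PySem.List.sorted (rest.filter po) strCodes with hOdef
  set P : List String := PREFERRED_MODELS.filter (fun p => decide (p ∈ u)) with hPdef
  -- basic facts about the predicates
  have hpm_pg : ∀ n, pm n = true → pg n = false := fun n h => not_gemini_of_gemma h
  have hpo : ∀ n, po n = true → pg n = false ∧ pm n = false := by
    intro n h
    rw [hpodef] at h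
    simp only [Bool.and_eq_true, Bool.not_eq_true'] at h
    exact h
  -- nodup of the filtered lists
  have hrestnd : rest.Nodup := hu.filter _
  have hGnd : (rest.filter pg).Nodup := hrestnd.filter _
  have hMnd : (rest.filter pm).Nodup := hrestnd.filter _
  have hOnd : (rest.filter po).Nodup := hrestnd.filter _
  -- membership characterizations
  have hGmem : ∀ {a : String}, a ∈ G → a ∉ PREFERRED_MODELS ∧ pg a = true := by
    intro a ha
    rw [hGdef, PySem.List.mem_sorted, List.mem_filter, hrestdef, List.mem_filter] at ha
    exact ⟨by simpa using ha.1.2, ha.2⟩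
  have hMmem : ∀ {a : String}, a ∈ M → a ∉ PREFERRED_MODELS ∧ pm a = true := by
    intro a ha
    rw [hMdef, PySem.List.mem_sorted, List.mem_filter, hrestdef, List.mem_filter] at ha
    exact ⟨by simpa using ha.1.2, ha.2⟩
  have hOmem : ∀ {a : String}, a ∈ O → a ∉ PREFERRED_MODELS ∧ po a = true := by
    intro a ha
    rw [hOdef, PySem.List.mem_sorted, List.mem_filter, hrestdef, List.mem_filter] at ha
    exact ⟨by simpa using ha.1.2, ha.2⟩
  have hPmem : ∀ {a : String}, a ∈ P → a ∈ PREFERRED_MODELS := by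
    intro a ha; rw [hPdef, List.mem_filter] at ha; exact ha.1
  -- rank values per bucket
  have hrkG : ∀ {a : String}, a ∈ G → rank a = 1 :: 0 :: strCodes a := by
    intro a ha; obtain ⟨h1, h2⟩ := hGmem ha; exact rank_gemini h1 h2
  have hrkM : ∀ {a : String}, a ∈ M → rank a = 2 :: 0 :: strCodes a := by
    intro a ha; obtain ⟨h1, h2⟩ := hMmem ha
    exact rank_gemma h1 (hpm_pg a h2) h2
  have hrkO : ∀ {a : String}, a ∈ O → rank a = 3 :: 0 :: strCodes a := by
    intro a ha; obtain ⟨h1, h2⟩ := hOmem ha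
    exact rank_other h1 (hpo a h2).1 (hpo a h2).2
  -- the permutation
  have hGperm : G.Perm (rest.filter pg) := PySem.List.sorted_perm _ _ _
  have hMperm : M.Perm (rest.filter pm) := PySem.List.sorted_perm _ _ _
  have hOperm : O.Perm (rest.filter po) := PySem.List.sorted_perm _ _ _
  have e1 : (rest.filter (fun n => !pg n)).filter pm = rest.filter pm := by
    rw [List.filter_filter]
    refine List.filter_congr ?_
    intro x _
    cases hx : pm x
    · simp
    · simp [hpm_pg x hx]
  have e2 : (rest.filter (fun n => !pg n)).filter (fun n => !pm n) = rest.filter po := by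
    rw [List.filter_filter]
    refine List.filter_congr ?_
    intro x _
    rw [hpodef, hpgdef, hpmdef]
    exact Bool.and_comm _ _
  have hsplit2 : (rest.filter pm ++ rest.filter po).Perm (rest.filter (fun n => !pg n)) := by
    rw [← e1, ← e2]; exact List.filter_append_perm _ _
  have hsplit : (rest.filter pg ++ (rest.filter pm ++ rest.filter po)).Perm rest :=
    (List.Perm.append_left _ hsplit2).trans (List.filter_append_perm pg rest)
  have hP : P.Perm (u.filter (fun n => decide (n ∈ PREFERRED_MODELS))) := by
    rw [List.perm_ext_iff_of_nodup (hPMnd.filter _) (hu.filter _)]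
    intro x
    simp only [List.mem_filter, decide_eq_true_eq]
    exact and_comm
  have husplit : (u.filter (fun n => decide (n ∈ PREFERRED_MODELS)) ++ rest).Perm u := by
    have hr : rest = u.filter (fun n => !decide (n ∈ PREFERRED_MODELS)) := by
      rw [hrestdef]; exact List.filter_congr (fun x _ => by simp)
    rw [hr]; exact List.filter_append_perm _ u
  have hperm : (P ++ (G ++ (M ++ O))).Perm u :=
    (hP.append ((hGperm.append (hMperm.append hOperm)).trans hsplit)).trans husplit
  -- pairwise strict rank ordering
  have pwP : P.Pairwise (fun a b => rank a < rank b) :=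
    List.Pairwise.sublist List.filter_sublist pm_rank_pairwise
  have pwG : G.Pairwise (fun a b => rank a < rank b) := by
    refine (sorted_codes_pairwise_lt hGnd).imp_of_mem ?_
    intro a b ha hb hlt
    rw [hrkG ha, hrkG hb]
    exact cons_lt_of_tail (cons_lt_of_tail hlt)
  have pwM : M.Pairwise (fun a b => rank a < rank b) := by
    refine (sorted_codes_pairwise_lt hMnd).imp_of_mem ?_
    intro a b ha hb hlt
    rw [hrkM ha, hrkM hb]
    exact cons_lt_of_tail (cons_lt_of_tail hlt)
  have pwO : O.Pairwise (fun a b => rank a < rank b) := by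
    refine (sorted_codes_pairwise_lt hOnd).imp_of_mem ?_
    intro a b ha hb hlt
    rw [hrkO ha, hrkO hb]
    exact cons_lt_of_tail (cons_lt_of_tail hlt)
  have pwMO : (M ++ O).Pairwise (fun a b => rank a < rank b) := by
    rw [List.pairwise_append]
    refine ⟨pwM, pwO, ?_⟩
    intro x hx y hy
    rw [hrkM hx, hrkO hy]
    exact cons_lt_of_head (by norm_num)
  have pwGMO : (G ++ (M ++ O)).Pairwise (fun a b => rank a < rank b) := by
    rw [List.pairwise_append]
    refine ⟨pwG, pwMO, ?_⟩
    intro x hx y hy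
    rcases List.mem_append.mp hy with hy | hy
    · rw [hrkG hx, hrkM hy]; exact cons_lt_of_head (by norm_num)
    · rw [hrkG hx, hrkO hy]; exact cons_lt_of_head (by norm_num)
  have hrk0 : ∀ {a : String}, a ∈ P → ∃ s, rank a = 0 :: s := by
    intro a ha
    exact ⟨_, rank_of_mem (hPmem ha)⟩
  have pwAll : (P ++ (G ++ (M ++ O))).Pairwise (fun a b => rank a < rank b) := by
    rw [List.pairwise_append]
    refine ⟨pwP, pwGMO, ?_⟩
    intro x hx y hy
    obtain ⟨s, hs⟩ := hrk0 hx
    rcases List.mem_append.mp hy with hy | hy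
    · rw [hs, hrkG hy]; exact cons_lt_of_head (by norm_num)
    rcases List.mem_append.mp hy with hy | hy
    · rw [hs, hrkM hy]; exact cons_lt_of_head (by norm_num)
    · rw [hs, hrkO hy]; exact cons_lt_of_head (by norm_num)
  have hmain := PySem.List.sorted_eq_of_perm_of_pairwise_lt u (P ++ (G ++ (M ++ O))) rank hperm pwAll
  rw [sorted_inst_eq, hmain, ← List.append_assoc, ← List.append_assoc]

theorem sort_models_py_spec_aux : ∀ (models : List String),
    sort_models_py models = sort_models_py_alt models := by
  intro models
  unfold sort_models_py sort_models_py_alt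
  rw [buckets_core _ (PySem.List.nodup_dedup _)]

-- ===== VERDICT (by name: the statement is the Claim_ definition above) =====
theorem sort_models_py_spec : Claim_equal_sort_models_py := by
  intro models _
  exact sort_models_py_spec_aux models
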